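-- pv_equiv track=rewrite | github.com/Teyeray/leetcode | huawei_A_2025/photovoltaic_station_optimizer/photovoltaic_station_optimizer.py | get_area_power
-- ===== SOURCE A (Python) =====
-- def get_area_power(lines, settings):
--     area = []
--     output = []
--     if settings[2] == 1:
--         return lines[:]
--     for j in range(settings[0]):
--         for i in range(settings[1] - settings[2] + 1):
--             curr_vol = 0
--             for k in range(settings[2]):
--                 curr_vol += lines[j * settings[1] + i + k]
--             if k == settings[2] - 1:
--                 area.append(curr_vol)
--     new_horizontal = settings[1] - settings[2] + 1
--     for i in range(new_horizontal):
--         for j in range(settings[0]- settings[2] + 1):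
--             curr_vol = 0
--             for k in range(settings[2]):
--                 curr_vol += area[(j+k) * new_horizontal + i]
--             if k == settings[2] - 1:
--                 output.append(curr_vol)
--     return output
-- ===== SOURCE B (Python) =====
-- def get_area_power(lines, settings):
--     rows, cols, k = settings[0], settings[1], settings[2]
--     if k == 1:
--         return lines[:]
--     w = cols - k + 1
--     h = rows - k + 1
--     if w <= 0 or h <= 0:
--         return []
--     # horizontal sliding-window sums, one pass per row: horiz[j][i] = sum(lines[j*cols+i : j*cols+i+k])
--     horiz = []
--     for j in range(rows):
--         base = j * cols
--         s = sum(lines[base:base + k])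
--         row_sums = [s]
--         for i in range(1, w):
--             s += lines[base + i + k - 1] - lines[base + i - 1]
--             row_sums.append(s)
--         horiz.append(row_sums)
--     # vertical sliding window down each column, emitted column-major
--     out = []
--     for i in range(w):
--         s = sum(horiz[j][i] for j in range(k))
--         out.append(s)
--         for j in range(1, h):
--             s += horiz[j + k - 1][i] - horiz[j - 1][i]
--             out.append(s)
--     return out
-- ===== Notes on version B (the rewrite author's own statement) =====
-- stated objective: alternative
-- what changed: A recomputes each k-wide sum from scratch in two nested passes (k additions per window); B computes the same column-major output with incremental sliding windows (horizontal per row, then vertical per column), doing constant work per emitted window instead of re-summing it.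
import Mathlib
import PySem

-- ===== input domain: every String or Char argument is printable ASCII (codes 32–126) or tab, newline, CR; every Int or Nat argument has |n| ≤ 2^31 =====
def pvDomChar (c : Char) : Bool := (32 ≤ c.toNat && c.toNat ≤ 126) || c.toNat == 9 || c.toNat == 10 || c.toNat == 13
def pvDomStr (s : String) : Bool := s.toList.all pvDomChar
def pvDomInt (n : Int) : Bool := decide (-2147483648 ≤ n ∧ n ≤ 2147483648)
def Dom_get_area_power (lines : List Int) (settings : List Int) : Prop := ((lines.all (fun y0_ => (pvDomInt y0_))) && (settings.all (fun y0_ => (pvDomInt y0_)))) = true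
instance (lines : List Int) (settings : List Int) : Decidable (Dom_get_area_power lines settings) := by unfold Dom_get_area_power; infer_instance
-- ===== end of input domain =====

-- B computes the same column-major k-square window sums by a different algorithm:
-- incremental sliding windows (horizontal per row, then vertical per column)
-- instead of A's per-window re-summation.


-- ===== PORT A =====
-- Literal port of A.  Python's trailing guard 'if k == settings[2]-1' is ported as always
-- appending: after the (under Pre_ nonempty) inner 'for k in range(settings[2])' loop the
-- shadowed variable k always equals settings[2]-1, so the guard is True whenever it is reached.
-- 'lines[:]' is 'slice lines none none'.
def get_area_power (lines : List Int) (settings : List Int) : List Int :=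
  if PySem.List.pyGetD settings 2 0 = 1 then
    PySem.List.slice lines none none
  else
    let s0 := PySem.List.pyGetD settings 0 0
    let s1 := PySem.List.pyGetD settings 1 0
    let s2 := PySem.List.pyGetD settings 2 0
    let area : List Int :=
      (PySem.List.pyRange 0 s0 1).foldl (fun area j =>
        (PySem.List.pyRange 0 (s1 - s2 + 1) 1).foldl (fun area i =>
          area ++ [(PySem.List.pyRange 0 s2 1).foldl
            (fun cv t => cv + PySem.List.pyGetD lines (j * s1 + i + t) 0) 0]) area) []
    let nh := s1 - s2 + 1
    (PySem.List.pyRange 0 nh 1).foldl (fun output i =>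
      (PySem.List.pyRange 0 (s0 - s2 + 1) 1).foldl (fun output j =>
        output ++ [(PySem.List.pyRange 0 s2 1).foldl
          (fun cv t => cv + PySem.List.pyGetD area ((j + t) * nh + i) 0) 0]) output) []

-- ===== PORT B =====
-- Literal port of B (Source B): horizontal sliding-window sums per row, then a vertical
-- sliding window down each column, emitted column-major.
def get_area_power_alt (lines : List Int) (settings : List Int) : List Int :=
  let rows := PySem.List.pyGetD settings 0 0
  let cols := PySem.List.pyGetD settings 1 0
  let k := PySem.List.pyGetD settings 2 0
  if k = 1 then lines
  else
    let w := cols - k + 1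
    let h := rows - k + 1
    if w ≤ 0 ∨ h ≤ 0 then []
    else
      let horiz : List (List Int) :=
        (PySem.List.pyRange 0 rows 1).foldl (fun hz j =>
          hz ++ [((PySem.List.pyRange 1 w 1).foldl
            (fun (p : List Int × Int) i =>
              (p.1 ++ [p.2 + PySem.List.pyGetD lines (j * cols + i + k - 1) 0
                           - PySem.List.pyGetD lines (j * cols + i - 1) 0],
               p.2 + PySem.List.pyGetD lines (j * cols + i + k - 1) 0
                   - PySem.List.pyGetD lines (j * cols + i - 1) 0))
            ([(PySem.List.slice lines (some (j * cols)) (some (j * cols + k))).sum],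
             (PySem.List.slice lines (some (j * cols)) (some (j * cols + k))).sum)).1]) []
      (PySem.List.pyRange 0 w 1).foldl (fun out i =>
        ((PySem.List.pyRange 1 h 1).foldl
          (fun (p : List Int × Int) j =>
            (p.1 ++ [p.2 + PySem.List.pyGetD (PySem.List.pyGetD horiz (j + k - 1) []) i 0
                         - PySem.List.pyGetD (PySem.List.pyGetD horiz (j - 1) []) i 0],
             p.2 + PySem.List.pyGetD (PySem.List.pyGetD horiz (j + k - 1) []) i 0
                 - PySem.List.pyGetD (PySem.List.pyGetD horiz (j - 1) []) i 0))
          (out ++ [((PySem.List.pyRange 0 k 1).map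
                     (fun j => PySem.List.pyGetD (PySem.List.pyGetD horiz j []) i 0)).sum],
           ((PySem.List.pyRange 0 k 1).map
             (fun j => PySem.List.pyGetD (PySem.List.pyGetD horiz j []) i 0)).sum)).1) []

-- ===== PRECONDITION & SPEC =====
-- Pre_ excludes exactly the inputs on which Python A raises (it never excludes an input on
-- which A returns): settings shorter than 3 (IndexError on settings[2]); window size k ≥ 2
-- with a grid that reaches a lines index ≥ len(lines) (IndexError); and non-positive k whose
-- loop bodies run (NameError on the never-assigned shadowed loop variable k).
def Pre_get_area_power (lines : List Int) (settings : List Int) : Prop :=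
  3 ≤ settings.length ∧
  (PySem.List.pyGetD settings 2 0 = 1 ∨
   (2 ≤ PySem.List.pyGetD settings 2 0 ∧
     (PySem.List.pyGetD settings 0 0 ≤ 0 ∨
      PySem.List.pyGetD settings 1 0 < PySem.List.pyGetD settings 2 0 ∨
      PySem.List.pyGetD settings 0 0 * PySem.List.pyGetD settings 1 0 ≤ (lines.length : Int))) ∨
   (PySem.List.pyGetD settings 2 0 ≤ 0 ∧
     (PySem.List.pyGetD settings 0 0 ≤ 0 ∨ PySem.List.pyGetD settings 1 0 < PySem.List.pyGetD settings 2 0) ∧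
     (PySem.List.pyGetD settings 1 0 < PySem.List.pyGetD settings 2 0 ∨
      PySem.List.pyGetD settings 0 0 < PySem.List.pyGetD settings 2 0)))
instance (lines : List Int) (settings : List Int) : Decidable (Pre_get_area_power lines settings) := by
  unfold Pre_get_area_power; infer_instance
def pvWitness_get_area_power : List Int × List Int := ([1, 2, 3, 4], [2, 2, 2])
def Spec_get_area_power (lines : List Int) (settings : List Int) (out : List Int) : Prop := out = get_area_power_alt lines settings
instance (lines : List Int) (settings : List Int) (out : List Int) : Decidable (Spec_get_area_power lines settings out) := by unfold Spec_get_area_power; infer_instance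

-- ===== CLAIM (what is proved, stated in full; the proofs are below) =====
def Claim_equal_get_area_power : Prop := ∀ (lines : List Int) (settings : List Int), Dom_get_area_power lines settings → Pre_get_area_power lines settings → Spec_get_area_power lines settings (get_area_power lines settings)

-- ===== LEMMAS AND PROOFS =====

-- window sum of lines starting at flat index J*C+I, length K (0 beyond the end, as both
-- ports' defaulted lookups give)
def pvH (lines : List Int) (C K J I : Nat) : Int :=
  ((List.range K).map (fun T : Nat => lines.getD (J * C + I + T) 0)).sum
-- the (I,J) entry of the result: vertical K-sum of horizontal window sums
def pvS (lines : List Int) (C K I J : Nat) : Int :=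
  ((List.range K).map (fun T : Nat => pvH lines C K (J + T) I)).sum
-- the common column-major specification both ports are proved equal to (main case)
def pvSpec (lines : List Int) (R C K : Nat) : List Int :=
  (List.range (C - K + 1)).flatMap (fun I : Nat =>
    (List.range (R - K + 1)).map (fun J : Nat => pvS lines C K I J))

theorem pv_foldl_id {α β : Type} (l : List β) (init : α) :
    l.foldl (fun a _ => a) init = init := by
  induction l generalizing init <;> simp_all [List.foldl]

theorem pv_range_cast (n : Nat) :
    PySem.List.pyRange 0 (n : Int) 1 = (List.range n).map (fun T : Nat => (T : Int)) := by
  rw [PySem.List.pyRange_one]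
  simp only [sub_zero, Int.toNat_natCast, zero_add]

theorem pv_flatMap_congr {α β : Type} (l : List α) (f g : α → List β)
    (h : ∀ a ∈ l, f a = g a) : l.flatMap f = l.flatMap g := by
  induction l with
  | nil => rfl
  | cons x xs ih =>
    simp only [List.flatMap_cons, h x (by simp), ih (fun a ha => h a (by simp [ha]))]

theorem pv_take_sum (l : List Int) (n : Nat) :
    (l.take (n + 1)).sum = (l.take n).sum + l.getD n 0 := by
  induction l generalizing n with
  | nil => simp
  | cons x xs ih =>
    cases n with
    | zero => simp [List.take_succ_cons]
    | succ n => simp only [List.take_succ_cons, List.sum_cons, List.getD_cons_succ, ih]; ring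

theorem pv_slice_sum (lines : List Int) (B K : Nat) :
    ((List.range K).map (fun T : Nat => lines.getD (B + T) 0)).sum
      = ((lines.drop B).take K).sum := by
  induction K with
  | zero => simp
  | succ K ih =>
    rw [List.range_succ]
    simp only [List.map_append, List.map_cons, List.map_nil, List.sum_append, List.sum_cons,
      List.sum_nil]
    rw [ih, pv_take_sum]
    have h : (lines.drop B).getD K 0 = lines.getD (B + K) 0 := by
      simp [List.getD_eq_getElem?_getD, List.getElem?_drop]
    rw [h]; ring

theorem pv_slideF (F : Int → Int) (K : Nat) (hK : 1 ≤ K) (i : Int) :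
    ((List.range K).map (fun T : Nat => F (i + (T : Int)))).sum
      = ((List.range K).map (fun T : Nat => F (i - 1 + (T : Int)))).sum
          + F (i + (K : Int) - 1) - F (i - 1) := by
  obtain ⟨K', rfl⟩ : ∃ K', K = K' + 1 := ⟨K - 1, by omega⟩
  have hL : ((List.range (K' + 1)).map (fun T : Nat => F (i + (T : Int)))).sum
      = ((List.range K').map (fun T : Nat => F (i + (T : Int)))).sum + F (i + (K' : Int)) := by
    rw [List.range_succ]; simp
  have hR : ((List.range (K' + 1)).map (fun T : Nat => F (i - 1 + (T : Int)))).sum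
      = F (i - 1) + ((List.range K').map (fun T : Nat => F (i + (T : Int)))).sum := by
    rw [List.range_succ_eq_map]
    simp only [List.map_cons, List.sum_cons, List.map_map, Nat.cast_zero, add_zero]
    congr 1
    apply congrArg
    apply List.map_congr_left
    intro T _
    simp only [Function.comp_apply]
    congr 1
    push_cast
    omega
  rw [hL, hR, show i + ((K' + 1 : Nat) : Int) - 1 = i + (K' : Int) by push_cast; ring]
  ring

theorem pv_build (u v S : Int → Int) (hstep : ∀ i : Int, S i = S (i - 1) + u i - v i) :
    ∀ (m : Nat) (L : List Int) (s0 : Int), s0 = S 0 →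
    (PySem.List.pyRange 1 ((m : Int) + 1) 1).foldl
        (fun (p : List Int × Int) i => (p.1 ++ [p.2 + u i - v i], p.2 + u i - v i))
        (L ++ [s0], s0)
      = (L ++ (List.range (m + 1)).map (fun I : Nat => S (I : Int)), S (m : Int)) := by
  intro m
  induction m with
  | zero =>
    intro L s0 hs0
    subst hs0
    rw [show ((0 : Nat) : Int) + 1 = 1 by simp, PySem.List.pyRange_one_eq_nil (by omega)]
    simp [List.range_one]
  | succ m ih =>
    intro L s0 hs0
    rw [show (((m + 1 : Nat)) : Int) + 1 = ((m : Int) + 1) + 1 by push_cast; ring,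
        PySem.List.pyRange_one_succ_right (by omega), List.foldl_append, ih L s0 hs0]
    simp only [List.foldl_cons, List.foldl_nil]
    have h1 : S (m : Int) + u ((m : Int) + 1) - v ((m : Int) + 1) = S ((m : Int) + 1) := by
      have h := hstep ((m : Int) + 1)
      simp only [add_sub_cancel_right] at h
      rw [h]
    rw [h1]
    simp only [Prod.mk.injEq]
    refine ⟨?_, by rw [show ((m + 1 : Nat) : Int) = (m : Int) + 1 by push_cast; ring]⟩
    rw [List.range_succ, List.map_append, List.range_succ, List.map_append,
        List.append_assoc]
    simp only [List.map_cons, List.map_nil, Nat.cast_add, Nat.cast_one]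
    rw [List.range_succ, List.map_append]
    simp

theorem pv_flat_len (f : Nat → List Int) (W : Nat) (hW : ∀ J, (f J).length = W) :
    ∀ R, ((List.range R).flatMap f).length = R * W := by
  intro R
  induction R with
  | zero => simp
  | succ R ih =>
    rw [List.range_succ]
    simp [List.flatMap_append, ih, hW]
    ring

theorem pv_flat_get (f : Nat → List Int) (W : Nat) (hW : ∀ J, (f J).length = W) :
    ∀ (R J I : Nat), J < R → I < W →
      ((List.range R).flatMap f).getD (J * W + I) 0 = (f J).getD I 0 := by
  intro R
  induction R with
  | zero => intro J I hJ hI; exact absurd hJ (Nat.not_lt_zero J)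
  | succ R ih =>
    intro J I hJ hI
    rw [List.range_succ, List.flatMap_append]
    simp only [List.flatMap_cons, List.flatMap_nil, List.append_nil]
    have hlen : ((List.range R).flatMap f).length = R * W := pv_flat_len f W hW R
    by_cases hJR : J < R
    · have hx : J * W + I < ((List.range R).flatMap f).length := by
        rw [hlen]
        have h2 : (J + 1) * W ≤ R * W := Nat.mul_le_mul_right W (by omega)
        have h3 : (J + 1) * W = J * W + W := by ring
        omega
      simp only [List.getD_eq_getElem?_getD]
      rw [List.getElem?_append_left hx]
      simp only [← List.getD_eq_getElem?_getD]
      exact ih J I hJR hI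
    · have hJR' : J = R := by omega
      have hge : ((List.range R).flatMap f).length ≤ J * W + I := by
        rw [hlen, hJR']; omega
      simp only [List.getD_eq_getElem?_getD]
      rw [List.getElem?_append_right hge, hlen, hJR',
          show R * W + I - R * W = I by omega]

theorem pv_row (lines : List Int) (C K : Nat) (hK : 2 ≤ K) (J : Nat) :
    ((PySem.List.pyRange 1 (((C - K + 1 : Nat)) : Int) 1).foldl
        (fun (p : List Int × Int) i =>
          (p.1 ++ [p.2 + PySem.List.pyGetD lines ((J : Int) * (C : Int) + i + (K : Int) - 1) 0
                       - PySem.List.pyGetD lines ((J : Int) * (C : Int) + i - 1) 0],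
           p.2 + PySem.List.pyGetD lines ((J : Int) * (C : Int) + i + (K : Int) - 1) 0
               - PySem.List.pyGetD lines ((J : Int) * (C : Int) + i - 1) 0))
        ([(PySem.List.slice lines (some ((J : Int) * (C : Int)))
             (some ((J : Int) * (C : Int) + (K : Int)))).sum],
         (PySem.List.slice lines (some ((J : Int) * (C : Int)))
             (some ((J : Int) * (C : Int) + (K : Int)))).sum)).1
    = (List.range (C - K + 1)).map (fun I : Nat => pvH lines C K J I) := by
  have hs0 : (PySem.List.slice lines (some ((J : Int) * (C : Int)))
        (some ((J : Int) * (C : Int) + (K : Int)))).sum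
      = ((List.range K).map
          (fun T : Nat => PySem.List.pyGetD lines ((J : Int) * (C : Int) + 0 + (T : Int)) 0)).sum := by
    have e1 : (List.range K).map
          (fun T : Nat => PySem.List.pyGetD lines ((J : Int) * (C : Int) + 0 + (T : Int)) 0)
        = (List.range K).map (fun T : Nat => lines.getD (J * C + T) 0) :=
      List.map_congr_left (fun T _ => by
        rw [show ((J : Int) * (C : Int) + 0 + (T : Int)) = ((J * C + T : Nat) : Int) by
              push_cast; ring, PySem.List.pyGetD_natCast])
    rw [e1, pv_slice_sum lines (J * C) K,
        show ((J : Int) * (C : Int)) = ((J * C : Nat) : Int) by push_cast; ring,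
        PySem.List.slice_natCast_add]
  have hstep : ∀ i : Int,
      ((List.range K).map (fun T : Nat =>
        PySem.List.pyGetD lines ((J : Int) * (C : Int) + i + (T : Int)) 0)).sum
      = ((List.range K).map (fun T : Nat =>
          PySem.List.pyGetD lines ((J : Int) * (C : Int) + (i - 1) + (T : Int)) 0)).sum
        + PySem.List.pyGetD lines ((J : Int) * (C : Int) + i + (K : Int) - 1) 0
        - PySem.List.pyGetD lines ((J : Int) * (C : Int) + i - 1) 0 := by
    intro i
    have h := pv_slideF (fun x => PySem.List.pyGetD lines ((J : Int) * (C : Int) + x) 0) K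
      (by omega) i
    have e : ∀ z : Int,
        ((List.range K).map (fun T : Nat =>
          PySem.List.pyGetD lines ((J : Int) * (C : Int) + (z + (T : Int))) 0)).sum
        = ((List.range K).map (fun T : Nat =>
            PySem.List.pyGetD lines ((J : Int) * (C : Int) + z + (T : Int)) 0)).sum := fun z =>
      congrArg List.sum (List.map_congr_left (fun T _ => by
        rw [show (J : Int) * (C : Int) + (z + (T : Int)) = (J : Int) * (C : Int) + z + (T : Int)
              from by ring]))
    simp only at h
    rw [e i, e (i - 1)] at h
    have a1 : PySem.List.pyGetD lines ((J : Int) * (C : Int) + (i + (K : Int) - 1)) 0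
        = PySem.List.pyGetD lines ((J : Int) * (C : Int) + i + (K : Int) - 1) 0 := by
      rw [show (J : Int) * (C : Int) + (i + (K : Int) - 1)
            = (J : Int) * (C : Int) + i + (K : Int) - 1 from by ring]
    have a2 : PySem.List.pyGetD lines ((J : Int) * (C : Int) + (i - 1)) 0
        = PySem.List.pyGetD lines ((J : Int) * (C : Int) + i - 1) 0 := by
      rw [show (J : Int) * (C : Int) + (i - 1) = (J : Int) * (C : Int) + i - 1 from by ring]
    rw [a1, a2] at h
    exact h
  have hb := pv_build
    (fun i => PySem.List.pyGetD lines ((J : Int) * (C : Int) + i + (K : Int) - 1) 0)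
    (fun i => PySem.List.pyGetD lines ((J : Int) * (C : Int) + i - 1) 0)
    (fun i => ((List.range K).map (fun T : Nat =>
      PySem.List.pyGetD lines ((J : Int) * (C : Int) + i + (T : Int)) 0)).sum)
    (fun i => hstep i) (C - K) []
    ((PySem.List.slice lines (some ((J : Int) * (C : Int)))
        (some ((J : Int) * (C : Int) + (K : Int)))).sum)
    hs0
  rw [show (((C - K + 1 : Nat)) : Int) = ((C - K : Nat) : Int) + 1 by omega]
  refine (congrArg Prod.fst hb).trans ?_
  dsimp only
  rw [List.nil_append]
  apply List.map_congr_left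
  intro I _
  unfold pvH
  apply congrArg List.sum
  apply List.map_congr_left
  intro T _
  rw [show (J : Int) * (C : Int) + (I : Int) + (T : Int) = ((J * C + I + T : Nat) : Int)
        from by push_cast; ring, PySem.List.pyGetD_natCast]

theorem pv_A_empty (lines settings : List Int)
    (hk : PySem.List.pyGetD settings 2 0 ≠ 1)
    (h : PySem.List.pyGetD settings 1 0 < PySem.List.pyGetD settings 2 0 ∨
         PySem.List.pyGetD settings 0 0 < PySem.List.pyGetD settings 2 0) :
    get_area_power lines settings = [] := by
  simp only [get_area_power, if_neg hk]
  rcases h with h | h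
  · rw [PySem.List.pyRange_one_eq_nil
      (show PySem.List.pyGetD settings 1 0 - PySem.List.pyGetD settings 2 0 + 1 ≤ 0 by omega)]
    simp only [List.foldl_nil]
  · rw [PySem.List.pyRange_one_eq_nil
      (show PySem.List.pyGetD settings 0 0 - PySem.List.pyGetD settings 2 0 + 1 ≤ 0 by omega)]
    simp only [List.foldl_nil]
    exact pv_foldl_id _ _

theorem pv_B_empty (lines settings : List Int)
    (hk : PySem.List.pyGetD settings 2 0 ≠ 1)
    (h : PySem.List.pyGetD settings 1 0 < PySem.List.pyGetD settings 2 0 ∨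
         PySem.List.pyGetD settings 0 0 < PySem.List.pyGetD settings 2 0) :
    get_area_power_alt lines settings = [] := by
  have hcond : PySem.List.pyGetD settings 1 0 - PySem.List.pyGetD settings 2 0 + 1 ≤ 0 ∨
      PySem.List.pyGetD settings 0 0 - PySem.List.pyGetD settings 2 0 + 1 ≤ 0 := by
    rcases h with h | h
    · exact Or.inl (by omega)
    · exact Or.inr (by omega)
  simp only [get_area_power_alt, if_neg hk, if_pos hcond]

theorem pv_A_main (lines settings : List Int) (R C K : Nat)
    (h0 : PySem.List.pyGetD settings 0 0 = (R : Int))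
    (h1 : PySem.List.pyGetD settings 1 0 = (C : Int))
    (h2 : PySem.List.pyGetD settings 2 0 = (K : Int))
    (hK : 2 ≤ K) (hKC : K ≤ C) (hKR : K ≤ R) :
    get_area_power lines settings = pvSpec lines R C K := by
  have hW : (C : Int) - (K : Int) + 1 = ((C - K + 1 : Nat) : Int) := by omega
  have hH : (R : Int) - (K : Int) + 1 = ((R - K + 1 : Nat) : Int) := by omega
  simp only [get_area_power, h0, h1, h2, hW, hH, pv_range_cast, List.foldl_map,
    PySem.List.foldl_add, zero_add, PySem.List.foldl_append_singleton_eq_map,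
    PySem.List.foldl_append_eq_flatMap, List.nil_append]
  rw [if_neg (show ¬((K : Int) = 1) by omega)]
  unfold pvSpec
  apply pv_flatMap_congr
  intro I hI
  have hIW : I < C - K + 1 := List.mem_range.mp hI
  apply List.map_congr_left
  intro J hJ
  have hJH : J < R - K + 1 := List.mem_range.mp hJ
  unfold pvS
  apply congrArg List.sum
  apply List.map_congr_left
  intro T hT
  have hTK : T < K := List.mem_range.mp hT
  rw [show ((J : Int) + (T : Int)) * ((C - K + 1 : Nat) : Int) + (I : Int)
        = (((J + T) * (C - K + 1) + I : Nat) : Int) by push_cast; ring,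
      PySem.List.pyGetD_natCast]
  rw [pv_flat_get _ (C - K + 1) (fun J' => by simp) R (J + T) I (by omega) hIW]
  rw [PySem.List.getD_map_range]
  · unfold pvH
    apply congrArg List.sum
    apply List.map_congr_left
    intro T' _
    rw [show ((J + T : Nat) : Int) * (C : Int) + (I : Int) + (T' : Int)
          = (((J + T) * C + I + T' : Nat) : Int) by push_cast; ring,
        PySem.List.pyGetD_natCast]
  · exact hIW

theorem pv_B_main (lines settings : List Int) (R C K : Nat)
    (h0 : PySem.List.pyGetD settings 0 0 = (R : Int))
    (h1 : PySem.List.pyGetD settings 1 0 = (C : Int))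
    (h2 : PySem.List.pyGetD settings 2 0 = (K : Int))
    (hK : 2 ≤ K) (hKC : K ≤ C) (hKR : K ≤ R) :
    get_area_power_alt lines settings = pvSpec lines R C K := by
  have hW : (C : Int) - (K : Int) + 1 = ((C - K + 1 : Nat) : Int) := by omega
  have hH : (R : Int) - (K : Int) + 1 = ((R - K + 1 : Nat) : Int) := by omega
  have hcond : ¬(((C - K + 1 : Nat) : Int) ≤ 0 ∨ ((R - K + 1 : Nat) : Int) ≤ 0) := by omega
  simp only [get_area_power_alt, h0, h1, h2, hW, hH]
  rw [if_neg (show ¬((K : Int) = 1) by omega), if_neg hcond]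
  simp only [pv_range_cast, List.foldl_map, PySem.List.foldl_append_singleton_eq_map,
    List.nil_append, List.map_map, Function.comp_def]
  rw [List.map_congr_left (fun (J : Nat) _ => pv_row lines C K hK J)]
  have hout : ∀ (out : List Int) (I : Nat), I ∈ List.range (C - K + 1) →
      (List.foldl
          (fun (p : List Int × Int) j =>
            (p.1 ++ [p.2 +
                  PySem.List.pyGetD (PySem.List.pyGetD
                    ((List.range R).map (fun J : Nat =>
                      (List.range (C - K + 1)).map (fun I' : Nat => pvH lines C K J I')))
                    (j + (K : Int) - 1) []) (I : Int) 0 -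
                  PySem.List.pyGetD (PySem.List.pyGetD
                    ((List.range R).map (fun J : Nat =>
                      (List.range (C - K + 1)).map (fun I' : Nat => pvH lines C K J I')))
                    (j - 1) []) (I : Int) 0],
              p.2 +
                  PySem.List.pyGetD (PySem.List.pyGetD
                    ((List.range R).map (fun J : Nat =>
                      (List.range (C - K + 1)).map (fun I' : Nat => pvH lines C K J I')))
                    (j + (K : Int) - 1) []) (I : Int) 0 -
                  PySem.List.pyGetD (PySem.List.pyGetD
                    ((List.range R).map (fun J : Nat =>
                      (List.range (C - K + 1)).map (fun I' : Nat => pvH lines C K J I')))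
                    (j - 1) []) (I : Int) 0))
          (out ++ [((List.range K).map (fun T : Nat =>
                PySem.List.pyGetD (PySem.List.pyGetD
                  ((List.range R).map (fun J : Nat =>
                    (List.range (C - K + 1)).map (fun I' : Nat => pvH lines C K J I')))
                  (T : Int) []) (I : Int) 0)).sum],
            ((List.range K).map (fun T : Nat =>
                PySem.List.pyGetD (PySem.List.pyGetD
                  ((List.range R).map (fun J : Nat =>
                    (List.range (C - K + 1)).map (fun I' : Nat => pvH lines C K J I')))
                  (T : Int) []) (I : Int) 0)).sum)
          (PySem.List.pyRange 1 ((R - K + 1 : Nat) : Int) 1)).1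
      = out ++ (List.range (R - K + 1)).map (fun J : Nat => pvS lines C K I J) := by
    intro out I hI
    have hIW : I < C - K + 1 := List.mem_range.mp hI
    have hstep2 : ∀ j : Int,
        ((List.range K).map (fun T : Nat =>
          PySem.List.pyGetD (PySem.List.pyGetD
            ((List.range R).map (fun J : Nat =>
              (List.range (C - K + 1)).map (fun I' : Nat => pvH lines C K J I')))
            (j + (T : Int)) []) (I : Int) 0)).sum
        = ((List.range K).map (fun T : Nat =>
            PySem.List.pyGetD (PySem.List.pyGetD
              ((List.range R).map (fun J : Nat =>
                (List.range (C - K + 1)).map (fun I' : Nat => pvH lines C K J I')))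
              (j - 1 + (T : Int)) []) (I : Int) 0)).sum
          + PySem.List.pyGetD (PySem.List.pyGetD
              ((List.range R).map (fun J : Nat =>
                (List.range (C - K + 1)).map (fun I' : Nat => pvH lines C K J I')))
              (j + (K : Int) - 1) []) (I : Int) 0
          - PySem.List.pyGetD (PySem.List.pyGetD
              ((List.range R).map (fun J : Nat =>
                (List.range (C - K + 1)).map (fun I' : Nat => pvH lines C K J I')))
              (j - 1) []) (I : Int) 0 := fun j =>
      pv_slideF (fun x =>
        PySem.List.pyGetD (PySem.List.pyGetD
          ((List.range R).map (fun J : Nat =>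
            (List.range (C - K + 1)).map (fun I' : Nat => pvH lines C K J I')))
          x []) (I : Int) 0) K (by omega) j
    have hs0 : ((List.range K).map (fun T : Nat =>
          PySem.List.pyGetD (PySem.List.pyGetD
            ((List.range R).map (fun J : Nat =>
              (List.range (C - K + 1)).map (fun I' : Nat => pvH lines C K J I')))
            (T : Int) []) (I : Int) 0)).sum
        = ((List.range K).map (fun T : Nat =>
            PySem.List.pyGetD (PySem.List.pyGetD
              ((List.range R).map (fun J : Nat =>
                (List.range (C - K + 1)).map (fun I' : Nat => pvH lines C K J I')))
              (0 + (T : Int)) []) (I : Int) 0)).sum :=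
      congrArg List.sum (List.map_congr_left (fun T _ => by rw [zero_add]))
    have hb := pv_build
      (fun j => PySem.List.pyGetD (PySem.List.pyGetD
        ((List.range R).map (fun J : Nat =>
          (List.range (C - K + 1)).map (fun I' : Nat => pvH lines C K J I')))
        (j + (K : Int) - 1) []) (I : Int) 0)
      (fun j => PySem.List.pyGetD (PySem.List.pyGetD
        ((List.range R).map (fun J : Nat =>
          (List.range (C - K + 1)).map (fun I' : Nat => pvH lines C K J I')))
        (j - 1) []) (I : Int) 0)
      (fun j => ((List.range K).map (fun T : Nat =>
        PySem.List.pyGetD (PySem.List.pyGetD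
          ((List.range R).map (fun J : Nat =>
            (List.range (C - K + 1)).map (fun I' : Nat => pvH lines C K J I')))
          (j + (T : Int)) []) (I : Int) 0)).sum)
      hstep2 (R - K) out
      (((List.range K).map (fun T : Nat =>
        PySem.List.pyGetD (PySem.List.pyGetD
          ((List.range R).map (fun J : Nat =>
            (List.range (C - K + 1)).map (fun I' : Nat => pvH lines C K J I')))
          (T : Int) []) (I : Int) 0)).sum)
      hs0
    rw [show ((R - K + 1 : Nat) : Int) = ((R - K : Nat) : Int) + 1 by omega]
    refine (congrArg Prod.fst hb).trans ?_
    dsimp only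
    apply congrArg
    apply List.map_congr_left
    intro Jx hJx
    have hJH : Jx < R - K + 1 := List.mem_range.mp hJx
    unfold pvS
    apply congrArg List.sum
    apply List.map_congr_left
    intro T hT
    have hTK : T < K := List.mem_range.mp hT
    rw [show (Jx : Int) + (T : Int) = ((Jx + T : Nat) : Int) by push_cast; ring]
    simp only [PySem.List.pyGetD_natCast]
    rw [PySem.List.getD_map_range _ _ _ _ (show Jx + T < R by omega),
        PySem.List.getD_map_range _ _ _ _ hIW]
  rw [PySem.List.foldl_congr_mem (List.range (C - K + 1)) _
        (fun out I => out ++ (List.range (R - K + 1)).map (fun J : Nat => pvS lines C K I J)) []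
        (fun acc x hx => hout acc x hx),
      PySem.List.foldl_append_eq_flatMap, List.nil_append]
  rfl

-- ===== VERDICT (by name: the statement is the Claim_ definition above) =====
theorem get_area_power_spec : Claim_equal_get_area_power := by
  intro lines settings _hDom hPre
  unfold Spec_get_area_power
  obtain ⟨hlen, hPre⟩ := hPre
  by_cases hk1 : PySem.List.pyGetD settings 2 0 = 1
  · simp [get_area_power, get_area_power_alt, hk1, PySem.List.slice_none_none]
  · by_cases hsmall : PySem.List.pyGetD settings 1 0 < PySem.List.pyGetD settings 2 0 ∨
        PySem.List.pyGetD settings 0 0 < PySem.List.pyGetD settings 2 0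
    · rw [pv_A_empty lines settings hk1 hsmall, pv_B_empty lines settings hk1 hsmall]
    · have hk2 : 2 ≤ PySem.List.pyGetD settings 2 0 := by
        rcases hPre with h | ⟨h, _⟩ | ⟨_, _, h'⟩
        · exact absurd h hk1
        · exact h
        · rcases h' with h' | h' <;> omega
      rw [pv_A_main lines settings (PySem.List.pyGetD settings 0 0).toNat
            (PySem.List.pyGetD settings 1 0).toNat (PySem.List.pyGetD settings 2 0).toNat
            (by omega) (by omega) (by omega) (by omega) (by omega) (by omega),
          pv_B_main lines settings (PySem.List.pyGetD settings 0 0).toNat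
            (PySem.List.pyGetD settings 1 0).toNat (PySem.List.pyGetD settings 2 0).toNat
            (by omega) (by omega) (by omega) (by omega) (by omega) (by omega)]
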